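-- pv_equiv track=rewrite | github.com/beshirr/DataCompression | 2D_PredictiveCoding/utilities.py | GetMinTupleFrom2DArray
-- ===== SOURCE A (Python) =====
-- def GetMinTupleFrom2DArray(values: list[list[tuple[int, int, int]]], ROWS: int, COLS: int) -> list[int]:
--     result: list[int] = [values[0][0][0], values[0][0][1], values[0][0][2]]
--
--     for row in range(ROWS):
--         for col in range(COLS):
--             result[0] = min(result[0], values[row][col][0])
--             result[1] = min(result[1], values[row][col][1])
--             result[2] = min(result[2], values[row][col][2])
--
--     return result
-- ===== SOURCE B (Python) =====
-- def GetMinTupleFrom2DArray(values: list[list[tuple[int, int, int]]], ROWS: int, COLS: int) -> list[int]: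
--     seed = values[0][0]
--     cells = [values[r][c] for r in range(ROWS) for c in range(COLS)]
--     return [min((t[i] for t in cells), default=seed[i]) for i in range(3)]
-- ===== Notes on version B (the rewrite author's own statement) =====
-- stated objective: alternative
-- what changed: Replaces A's single nested loop that maintains three running minima in a mutated result list with one flattening comprehension followed by three independent min(..., default=seed[i]) reductions, one per channel.
import Mathlib
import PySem

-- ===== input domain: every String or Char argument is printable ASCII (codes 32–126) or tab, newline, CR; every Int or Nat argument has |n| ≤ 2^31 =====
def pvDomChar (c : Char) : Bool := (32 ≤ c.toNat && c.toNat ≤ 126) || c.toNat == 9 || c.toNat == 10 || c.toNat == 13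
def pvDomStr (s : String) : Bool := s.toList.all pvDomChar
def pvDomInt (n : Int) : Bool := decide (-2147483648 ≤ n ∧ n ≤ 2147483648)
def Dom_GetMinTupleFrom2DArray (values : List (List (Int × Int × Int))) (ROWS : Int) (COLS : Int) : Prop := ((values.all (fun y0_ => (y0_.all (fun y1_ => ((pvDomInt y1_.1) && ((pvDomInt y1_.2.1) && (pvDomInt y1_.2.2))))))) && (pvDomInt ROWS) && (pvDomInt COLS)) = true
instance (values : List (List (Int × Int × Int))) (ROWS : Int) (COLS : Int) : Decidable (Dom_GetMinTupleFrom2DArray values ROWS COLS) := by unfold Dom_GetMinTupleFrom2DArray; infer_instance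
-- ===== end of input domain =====

-- B replaces A's single nested loop with three running minima by one flattened cell list and
-- three independent per-channel min reductions (objective: alternative decomposition).

-- ===== PORT A =====
-- Literal port of A: seed result from values[0][0]; nested for-loops over range(ROWS)/range(COLS),
-- each step rewrites result[0..2] in place (pyGetD/pySetD are exact under Pre_, which rules out IndexError).
def GetMinTupleFrom2DArray (values : List (List (Int × Int × Int))) (ROWS : Int) (COLS : Int) : List Int :=
  let t00 := PySem.List.pyGetD (PySem.List.pyGetD values 0 []) 0 (0, 0, 0)
  let result : List Int := [t00.1, t00.2.1, t00.2.2]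
  (PySem.List.pyRange 0 ROWS 1).foldl (fun result row =>
    (PySem.List.pyRange 0 COLS 1).foldl (fun result col =>
      let t := PySem.List.pyGetD (PySem.List.pyGetD values row []) col (0, 0, 0)
      let result := PySem.List.pySetD result 0 (min (PySem.List.pyGetD result 0 0) t.1)
      let result := PySem.List.pySetD result 1 (min (PySem.List.pyGetD result 1 0) t.2.1)
      let result := PySem.List.pySetD result 2 (min (PySem.List.pyGetD result 2 0) t.2.2)
      result) result) result

-- ===== PORT B =====
-- min(gen, default=d)
def pvMinD (xs : List Int) (d : Int) : Int :=
  match xs with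
  | [] => d
  | h :: t => t.foldl min h

-- tuple indexing t[i]; exact for i ∈ {0,1,2}, the only values B uses
def pvProjB (i : Int) (t : Int × Int × Int) : Int :=
  if i = 0 then t.1 else if i = 1 then t.2.1 else t.2.2

-- the flattening comprehension [values[r][c] for r in range(ROWS) for c in range(COLS)]
def pvCellsB (values : List (List (Int × Int × Int))) (ROWS : Int) (COLS : Int) : List (Int × Int × Int) :=
  (PySem.List.pyRange 0 ROWS 1).flatMap (fun r =>
    (PySem.List.pyRange 0 COLS 1).map (fun c =>
      PySem.List.pyGetD (PySem.List.pyGetD values r []) c (0, 0, 0)))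

def GetMinTupleFrom2DArray_alt (values : List (List (Int × Int × Int))) (ROWS : Int) (COLS : Int) : List Int :=
  let seed := PySem.List.pyGetD (PySem.List.pyGetD values 0 []) 0 (0, 0, 0)
  let cells := pvCellsB values ROWS COLS
  (PySem.List.pyRange 0 3 1).map (fun i => pvMinD (cells.map (pvProjB i)) (pvProjB i seed))

-- ===== PRECONDITION & SPEC =====
-- Pre_ holds exactly where Python A returns: values[0][0] must exist, and whenever the inner
-- loop body runs (COLS > 0) every visited row index must be in range with at least COLS columns.
def Pre_GetMinTupleFrom2DArray (values : List (List (Int × Int × Int))) (ROWS : Int) (COLS : Int) : Prop :=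
  values ≠ [] ∧ values.headD [] ≠ [] ∧
  (0 < COLS → ROWS ≤ (values.length : Int) ∧
    ∀ r ∈ List.range values.length, (r : Int) < ROWS → COLS ≤ ((values.getD r []).length : Int))
instance (values : List (List (Int × Int × Int))) (ROWS : Int) (COLS : Int) : Decidable (Pre_GetMinTupleFrom2DArray values ROWS COLS) := by unfold Pre_GetMinTupleFrom2DArray; infer_instance

def pvWitness_GetMinTupleFrom2DArray : (List (List (Int × Int × Int))) × Int × Int := ([[(1, 2, 3)]], 1, 1)

def Spec_GetMinTupleFrom2DArray (values : List (List (Int × Int × Int))) (ROWS : Int) (COLS : Int) (out : List Int) : Prop := out = GetMinTupleFrom2DArray_alt values ROWS COLS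
instance (values : List (List (Int × Int × Int))) (ROWS : Int) (COLS : Int) (out : List Int) : Decidable (Spec_GetMinTupleFrom2DArray values ROWS COLS out) := by unfold Spec_GetMinTupleFrom2DArray; infer_instance

-- ===== CLAIM (what is proved, stated in full; the proofs are below) =====
def Claim_equal_GetMinTupleFrom2DArray : Prop := ∀ (values : List (List (Int × Int × Int))) (ROWS : Int) (COLS : Int), Dom_GetMinTupleFrom2DArray values ROWS COLS → Pre_GetMinTupleFrom2DArray values ROWS COLS → Spec_GetMinTupleFrom2DArray values ROWS COLS (GetMinTupleFrom2DArray values ROWS COLS)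

-- ===== LEMMAS AND PROOFS =====

-- A's inner step on the 3-element accumulator, folded over a flat cell list, equals three channel folds.
lemma pvStepA (cells : List (Int × Int × Int)) (a b c : Int) :
    cells.foldl (fun result t =>
      let result := PySem.List.pySetD result 0 (min (PySem.List.pyGetD result 0 0) t.1)
      let result := PySem.List.pySetD result 1 (min (PySem.List.pyGetD result 1 0) t.2.1)
      let result := PySem.List.pySetD result 2 (min (PySem.List.pyGetD result 2 0) t.2.2)
      result) [a, b, c]
    = [cells.foldl (fun x t => min x t.1) a,
       cells.foldl (fun x t => min x t.2.1) b,
       cells.foldl (fun x t => min x t.2.2) c] := by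
  induction cells generalizing a b c with
  | nil => rfl
  | cons h t ih =>
      simp only [List.foldl_cons]
      rw [← ih]
      rfl

-- nested loops = fold over the flattened cell list
lemma pvFoldFlat (l m : List Int) (cell : Int → Int → (Int × Int × Int))
    (step : List Int → (Int × Int × Int) → List Int) (init : List Int) :
    l.foldl (fun res r => m.foldl (fun res c => step res (cell r c)) res) init
    = (l.flatMap (fun r => m.map (cell r))).foldl step init := by
  induction l generalizing init with
  | nil => rfl
  | cons h t ih =>
      simp only [List.foldl_cons, List.flatMap_cons, List.foldl_append, List.foldl_map]
      exact ih _

-- per-channel: running min seeded with the head's value = min with default of the mapped list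
lemma pvChan (p : (Int × Int × Int) → Int) (s : Int × Int × Int) (tail : List (Int × Int × Int)) :
    (s :: tail).foldl (fun x t => min x (p t)) (p s) = pvMinD ((s :: tail).map p) (p s) := by
  simp [pvMinD, List.foldl_map, min_self]

lemma pvRange3 : PySem.List.pyRange 0 3 1 = [0, 1, 2] := by decide

-- ===== VERDICT (by name: the statement is the Claim_ definition above) =====
theorem GetMinTupleFrom2DArray_spec : Claim_equal_GetMinTupleFrom2DArray := by
  intro values ROWS COLS _ _
  unfold Spec_GetMinTupleFrom2DArray GetMinTupleFrom2DArray GetMinTupleFrom2DArray_alt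
  simp only [pvRange3, List.map_cons, List.map_nil]
  rw [pvFoldFlat (PySem.List.pyRange 0 ROWS 1) (PySem.List.pyRange 0 COLS 1)
        (fun r c => PySem.List.pyGetD (PySem.List.pyGetD values r []) c (0,0,0))
        (fun result t =>
          let result := PySem.List.pySetD result 0 (min (PySem.List.pyGetD result 0 0) t.1)
          let result := PySem.List.pySetD result 1 (min (PySem.List.pyGetD result 1 0) t.2.1)
          let result := PySem.List.pySetD result 2 (min (PySem.List.pyGetD result 2 0) t.2.2)
          result)]
  rw [pvStepA]
  by_cases hR : 0 < ROWS
  · by_cases hC : 0 < COLS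
    · -- cells = seed :: tail
      have hcells : pvCellsB values ROWS COLS
          = PySem.List.pyGetD (PySem.List.pyGetD values 0 []) 0 (0,0,0)
            :: ((PySem.List.pyRange 1 COLS 1).map (fun c =>
                  PySem.List.pyGetD (PySem.List.pyGetD values 0 []) c (0,0,0))
              ++ (PySem.List.pyRange 1 ROWS 1).flatMap (fun r =>
                  (PySem.List.pyRange 0 COLS 1).map (fun c =>
                    PySem.List.pyGetD (PySem.List.pyGetD values r []) c (0,0,0)))) := by
        unfold pvCellsB
        rw [PySem.List.pyRange_one_cons (by omega : (0:Int) < ROWS)]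
        rw [List.flatMap_cons]
        rw [PySem.List.pyRange_one_cons (by omega : (0:Int) < COLS)]
        simp
      rw [show (PySem.List.pyRange 0 ROWS 1).flatMap (fun r =>
            (PySem.List.pyRange 0 COLS 1).map (fun c =>
              PySem.List.pyGetD (PySem.List.pyGetD values r []) c (0,0,0)))
          = pvCellsB values ROWS COLS from rfl]
      rw [hcells]
      have hp0 : pvProjB 0 = fun t => t.1 := by funext t; simp [pvProjB]
      have hp1 : pvProjB 1 = fun t => t.2.1 := by funext t; simp [pvProjB]
      have hp2 : pvProjB 2 = fun t => t.2.2 := by funext t; simp [pvProjB]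
      rw [hp0, hp1, hp2, pvChan (fun t => t.1), pvChan (fun t => t.2.1), pvChan (fun t => t.2.2)]
    · have hcells : pvCellsB values ROWS COLS = [] := by
        unfold pvCellsB
        rw [PySem.List.pyRange_one_eq_nil (b := COLS) (by omega)]
        simp
      rw [show (PySem.List.pyRange 0 ROWS 1).flatMap (fun r =>
            (PySem.List.pyRange 0 COLS 1).map (fun c =>
              PySem.List.pyGetD (PySem.List.pyGetD values r []) c (0,0,0)))
          = pvCellsB values ROWS COLS from rfl]
      rw [hcells]
      simp [pvMinD, pvProjB]
  · have hcells : pvCellsB values ROWS COLS = [] := by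
      unfold pvCellsB
      rw [PySem.List.pyRange_one_eq_nil (b := ROWS) (by omega)]
      simp
    rw [show (PySem.List.pyRange 0 ROWS 1).flatMap (fun r =>
          (PySem.List.pyRange 0 COLS 1).map (fun c =>
            PySem.List.pyGetD (PySem.List.pyGetD values r []) c (0,0,0)))
        = pvCellsB values ROWS COLS from rfl]
    rw [hcells]
    simp [pvMinD, pvProjB]
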